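-- pv_equiv track=rewrite | github.com/aniposion/lovekorea.me | create_post.py | insert_after_h1
-- ===== SOURCE A (Python) =====
-- def insert_after_h1(md: str, block: str) -> str:
--     if not md or not block:
--         return md or ""
--     lines = md.splitlines()
--     out = []
--     inserted = False
--     for line in lines:
--         out.append(line)
--         if not inserted and line.startswith("# "):
--             out.append("")
--             out.append(block)
--             out.append("")
--             inserted = True
--     return "\n".join(out)
-- ===== SOURCE B (Python) =====
-- def insert_after_h1(md: str, block: str) -> str:
--     if not md or not block:
--         return md or ""
--     lines = md.splitlines()
--     for i, line in enumerate(lines):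
--         if line.startswith("# "):
--             return "\n".join(lines[:i + 1] + ["", block, ""] + lines[i + 1:])
--     return "\n".join(lines)
-- ===== Notes on version B (the rewrite author's own statement) =====
-- stated objective: alternative
-- what changed: Replaces the stream-and-flag accumulation pass with locate-the-first-H1-index then splice by slice concatenation (lines[:i+1] + ['', block, ''] + lines[i+1:]).
import Mathlib
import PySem

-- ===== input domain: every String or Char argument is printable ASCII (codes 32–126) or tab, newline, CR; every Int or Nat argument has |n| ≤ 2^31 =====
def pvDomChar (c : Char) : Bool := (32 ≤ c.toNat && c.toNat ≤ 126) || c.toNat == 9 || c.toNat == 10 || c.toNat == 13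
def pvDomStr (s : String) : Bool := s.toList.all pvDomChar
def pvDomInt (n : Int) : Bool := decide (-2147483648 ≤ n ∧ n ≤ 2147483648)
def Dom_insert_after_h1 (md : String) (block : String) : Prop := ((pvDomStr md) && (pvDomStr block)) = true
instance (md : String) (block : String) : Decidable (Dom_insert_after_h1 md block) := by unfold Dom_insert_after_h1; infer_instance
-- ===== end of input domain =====

-- A and B both only return a single string; B changes the decomposition: locate the first
-- "# " line's index, then splice by slice concatenation, instead of A's stream-and-flag pass.

-- ===== PORT A =====
-- loop body of A: append the line; on the first H1 line also append "", block, "" and set the flag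
def stepA (block : String) (acc : List String × Bool) (line : String) : List String × Bool :=
  let out := acc.1 ++ [line]
  if !acc.2 && PySem.Str.startswith line "# " then (out ++ ["", block, ""], true)
  else (out, acc.2)

def insert_after_h1 (md : String) (block : String) : String :=
  if md = "" || block = "" then md      -- 'return md or ""' : equals md in both branches
  else
    let lines := PySem.Str.splitlines md
    let st := lines.foldl (stepA block) ([], false)
    PySem.Str.join "\n" st.1

-- ===== PORT B =====
def insert_after_h1_alt (md : String) (block : String) : String :=
  if md = "" || block = "" then md
  else
    let lines := PySem.Str.splitlines md
    match lines.findIdx? (fun line => PySem.Str.startswith line "# ") with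
    | some i => PySem.Str.join "\n" (lines.take (i + 1) ++ ["", block, ""] ++ lines.drop (i + 1))
    | none => PySem.Str.join "\n" lines

-- ===== PRECONDITION & SPEC =====
def Spec_insert_after_h1 (md : String) (block : String) (out : String) : Prop := out = insert_after_h1_alt md block
instance (md : String) (block : String) (out : String) : Decidable (Spec_insert_after_h1 md block out) := by unfold Spec_insert_after_h1; infer_instance

-- ===== CLAIM (what is proved, stated in full; the proofs are below) =====
def Claim_equal_insert_after_h1 : Prop := ∀ (md : String) (block : String), Dom_insert_after_h1 md block → Spec_insert_after_h1 md block (insert_after_h1 md block)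

-- ===== LEMMAS AND PROOFS =====

-- once the flag is set, the rest of the loop just appends the remaining lines
theorem foldl_stepA_true (block : String) (ls : List String) :
    ∀ out : List String, ls.foldl (stepA block) (out, true) = (out ++ ls, true) := by
  induction ls with
  | nil => simp
  | cons l ls ih => intro out; simp [stepA, ih]

-- with the flag unset, the loop result is the splice at the first H1 index (or the lines unchanged)
theorem foldl_stepA_false (block : String) (ls : List String) :
    ∀ out : List String,
      (ls.foldl (stepA block) (out, false)).1 =
        out ++ (match ls.findIdx? (fun l => PySem.Str.startswith l "# ") with
          | some i => ls.take (i + 1) ++ ["", block, ""] ++ ls.drop (i + 1)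
          | none => ls) := by
  induction ls with
  | nil => simp
  | cons l ls ih =>
    intro out
    by_cases h : PySem.Chars.startswith l.toList ['#', ' '] = true
    · simp [stepA, h, foldl_stepA_true, List.findIdx?_cons]
    · rw [List.foldl_cons]
      simp only [stepA]
      rw [if_neg (by simp [h])]
      rw [ih (out ++ [l])]
      cases hf : ls.findIdx? (fun l => PySem.Chars.startswith l.toList ['#', ' ']) with
      | none => simp [List.findIdx?_cons, h, hf]
      | some i => simp [List.findIdx?_cons, h, hf, List.take_succ_cons, List.drop_succ_cons]

-- ===== VERDICT (by name: the statement is the Claim_ definition above) =====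
theorem insert_after_h1_spec : Claim_equal_insert_after_h1 := by
  intro md block _
  unfold Spec_insert_after_h1 insert_after_h1 insert_after_h1_alt
  by_cases h : (md = "" || block = "") = true
  · rw [if_pos h, if_pos h]
  · rw [if_neg h, if_neg h]
    simp only [foldl_stepA_false]
    cases hf : (PySem.Str.splitlines md).findIdx? (fun l => PySem.Str.startswith l "# ") <;> simp
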